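-- pv_equiv track=rewrite | github.com/salma71/interview_practice | epi_judge_python/replace_and_remove.py | replace_and_remove
-- ===== SOURCE A (Python) =====
-- from typing import List
--
-- def replace_and_remove(size: int, s: List[str]) -> int:
--     # remove the excess letter and count the number of a's
--     b_index , a_count = 0, 0
--     for i in range(size):
--         if s[i] != 'b':
--             s[b_index] = s[i]
--             b_index += 1
--         if s[i] == 'a':
--             a_count += 1
--
--     # backward elimination replace a with dd
--     curr_index = b_index - 1
--     b_index += a_count - 1
--     final_size = b_index + 1
--
--     while curr_index >= 0:
--         if s[curr_index] == 'a':
--             s[b_index - 1:b_index + 1] = 'dd'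
--             b_index -= 2
--         else:
--             s[b_index] = s[curr_index]
--             b_index -= 1
--         curr_index -= 1
--     return final_size
-- ===== SOURCE B (Python) =====
-- from typing import List
--
-- def replace_and_remove(size: int, s: List[str]) -> int:
--     # single forward pass: build the final contents, then copy back in place
--     result = []
--     for i in range(size):
--         x = s[i]
--         if x == 'a':
--             result.append('d')
--             result.append('d')
--         elif x != 'b':
--             result.append(x)
--     for j in range(len(result)):
--         s[j] = result[j]
--     return len(result)
-- ===== Notes on version B (the rewrite author's own statement) =====
-- stated objective: simpler
-- what changed: Replaces A's two-phase in-place scheme (forward compaction that drops 'b's and counts 'a's, then a backward expansion pass writing 'dd' from the end) with one forward pass that builds the result list directly and copies it back element by element. Pre_ excludes inputs on which A raises IndexError (size > len(s)) and capacity-overflow inputs (final length > len(s)), where, depending on the arrangement of 'a's, A either raises IndexError or returns after growing the list via slice assignment and B's element-by-element write-back raises IndexError.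
-- outside the precondition, e.g. on replace_and_remove(1, ['a']): A returns 2, B raises IndexError
import Mathlib
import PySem

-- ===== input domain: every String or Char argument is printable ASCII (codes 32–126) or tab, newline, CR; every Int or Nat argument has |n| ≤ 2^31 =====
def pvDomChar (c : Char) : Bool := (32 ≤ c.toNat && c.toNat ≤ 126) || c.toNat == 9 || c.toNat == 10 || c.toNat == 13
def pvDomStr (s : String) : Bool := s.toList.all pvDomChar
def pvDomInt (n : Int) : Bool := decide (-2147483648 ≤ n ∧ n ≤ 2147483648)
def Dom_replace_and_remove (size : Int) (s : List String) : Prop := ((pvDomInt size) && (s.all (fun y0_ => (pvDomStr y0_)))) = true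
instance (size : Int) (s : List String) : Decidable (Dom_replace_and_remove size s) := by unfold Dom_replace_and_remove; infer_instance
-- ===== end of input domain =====

-- B replaces A's two-phase in-place scheme (forward compaction + backward 'dd' expansion) by one
-- forward pass building the result list, copied back in place; equivalence is proved for the RETURN
-- value (both mutate s: on Pre_ they leave the same list, which is not part of the claim).

-- ===== PORT A =====
-- first loop of A: for i in range(size): compact non-'b' forward, count 'a'.
-- counters b_index/a_count/i are nonnegative throughout, kept as Nat; n is the iteration count.
def pvLoopA1 : List String → Nat → Nat → Nat → Nat → List String × Nat × Nat
  | s, b, a, _, 0 => (s, b, a)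
  | s, b, a, i, n+1 =>
    let x := s.getD i ""
    let sb := if x ≠ "b" then (s.set b x, b + 1) else (s, b)
    let a' := if x = "a" then a + 1 else a
    pvLoopA1 sb.1 sb.2 a' (i+1) n

-- second (while) loop of A, fuel = curr_index+1; the slice assignment s[b-1:b+1] = 'dd' is ported
-- as two element writes, exact when 0 ≤ b-1 and b+1 ≤ len(s) (always the case inside Pre_).
def pvLoopA2 : List String → Int → Nat → List String
  | s, _, 0 => s
  | s, b, k+1 =>
    let x := s.getD k ""
    if x = "a" then pvLoopA2 ((s.set (b-1).toNat "d").set b.toNat "d") (b-2) k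
    else pvLoopA2 (s.set b.toNat x) (b-1) k

def replace_and_remove (size : Int) (s : List String) : Int :=
  let r := pvLoopA1 s 0 0 0 size.toNat
  let b_index : Int := (r.2.1 : Int)
  let a_count : Int := (r.2.2 : Int)
  let curr_index : Int := b_index - 1
  let b2 : Int := b_index + a_count - 1
  let final_size : Int := b2 + 1
  let _s2 := pvLoopA2 r.1 b2 (curr_index + 1).toNat
  final_size

-- ===== PORT B =====
-- single forward pass of B building the result list
def pvLoopB : List String → Nat → Nat → List String → List String
  | _, _, 0, acc => acc
  | s, i, n+1, acc =>
    let x := s.getD i ""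
    pvLoopB s (i+1) n (acc ++ (if x = "a" then ["d", "d"] else if x = "b" then [] else [x]))

-- B's write-back loop: for j in range(len(result)): s[j] = result[j]
def pvWriteB (s res : List String) : List String :=
  (List.range res.length).foldl (fun t j => t.set j (res.getD j "")) s

def replace_and_remove_alt (size : Int) (s : List String) : Int :=
  let result := pvLoopB s 0 size.toNat []
  let _s2 := pvWriteB s result
  (result.length : Int)

-- ===== PRECONDITION & SPEC =====
-- Pre_ excludes the inputs on which Python A raises IndexError (size > len(s)) and the
-- capacity-overflow inputs (final length > len(s)); on the latter, depending on the arrangement of 'a's,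
-- A either raises IndexError or returns after growing the list via slice assignment, and B's
-- element-by-element write-back raises IndexError there.
def Pre_replace_and_remove (size : Int) (s : List String) : Prop :=
  size ≤ (s.length : Int) ∧
    ((s.take size.toNat).countP (fun x => x ≠ "b") : Int) +
      ((s.take size.toNat).countP (fun x => x = "a") : Int) ≤ (s.length : Int)
instance (size : Int) (s : List String) : Decidable (Pre_replace_and_remove size s) := by
  unfold Pre_replace_and_remove; infer_instance

def pvWitness_replace_and_remove : Int × List String := (2, ["a", "b", "c"])

def Spec_replace_and_remove (size : Int) (s : List String) (out : Int) : Prop := out = replace_and_remove_alt size s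
instance (size : Int) (s : List String) (out : Int) : Decidable (Spec_replace_and_remove size s out) := by unfold Spec_replace_and_remove; infer_instance

-- ===== CLAIM (what is proved, stated in full; the proofs are below) =====
def Claim_equal_replace_and_remove : Prop := ∀ (size : Int) (s : List String), Dom_replace_and_remove size s → Pre_replace_and_remove size s → Spec_replace_and_remove size s (replace_and_remove size s)

-- ===== LEMMAS AND PROOFS =====

lemma pvLoopB_acc (n : Nat) : ∀ (s : List String) (i : Nat) (acc : List String),
    pvLoopB s i n acc = acc ++ pvLoopB s i n [] := by
  induction n with
  | zero => intro s i acc; simp [pvLoopB]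
  | succ n ih =>
    intro s i acc
    simp only [pvLoopB]
    rw [ih, ih s (i+1) (([] : List String) ++ _)]
    simp

-- core invariant: the first loop of A reads only original values (writes go to b ≤ i), and
-- b_index + a_count advances by exactly the length of B's chunk for each element.
lemma pvMain (n : Nat) : ∀ (s0 s' : List String) (b a i : Nat),
    b ≤ i → (∀ j, i ≤ j → s'.getD j "" = s0.getD j "") →
    (pvLoopA1 s' b a i n).2.1 + (pvLoopA1 s' b a i n).2.2
      = b + a + (pvLoopB s0 i n []).length := by
  induction n with
  | zero => intro s0 s' b a i _ _; simp [pvLoopA1, pvLoopB]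
  | succ n ih =>
    intro s0 s' b a i hbi hagree
    have hx : s'.getD i "" = s0.getD i "" := hagree i le_rfl
    have hset : ∀ (x : String) (j : Nat), i + 1 ≤ j → (s'.set b x).getD j "" = s0.getD j "" := by
      intro x j hj
      rw [List.getD, List.getElem?_set_ne (by omega), ← List.getD]
      exact hagree j (by omega)
    simp only [pvLoopA1, pvLoopB, hx]
    by_cases hb : s0.getD i "" = "b"
    · rw [hb, if_neg (show ¬¬("b" : String) = "b" from by decide),
          if_neg (show ¬("b" : String) = "a" from by decide),
          if_pos (show ("b" : String) = "b" from rfl)]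
      rw [pvLoopB_acc n s0 (i+1)]
      rw [ih s0 s' b a (i+1) (by omega) (fun j hj => hagree j (by omega))]
      simp
    · by_cases ha : s0.getD i "" = "a"
      · rw [ha, if_pos (show ¬("a" : String) = "b" from by decide),
            if_pos (show ("a" : String) = "a" from rfl)]
        rw [pvLoopB_acc n s0 (i+1)]
        rw [ih s0 (s'.set b "a") (b+1) (a+1) (i+1) (by omega) (hset "a")]
        simp
        omega
      · rw [if_pos (show ¬(s0.getD i "") = "b" from hb), if_neg ha, if_neg ha, if_neg hb]
        rw [pvLoopB_acc n s0 (i+1)]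
        rw [ih s0 (s'.set b (s0.getD i "")) (b+1) a (i+1) (by omega) (hset _)]
        simp
        omega

-- ===== VERDICT (by name: the statement is the Claim_ definition above) =====
theorem replace_and_remove_spec : Claim_equal_replace_and_remove := by
  intro size s _dom _pre
  unfold Spec_replace_and_remove
  show replace_and_remove size s = replace_and_remove_alt size s
  unfold replace_and_remove replace_and_remove_alt
  have h := pvMain size.toNat s s 0 0 0 (le_refl 0) (fun j _ => rfl)
  simp only [Nat.zero_add] at h
  simp only []
  omega
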